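-- pv_equiv track=rewrite | github.com/fabbrob/Project-2 | models/leaderboard.py | get_user_position
-- ===== SOURCE A (Python) =====
-- def get_user_position(user_id, leaderboard):
--     position = 1
--     for user in leaderboard:
--         if user['id'] == user_id:
--             for user_to_compare in leaderboard:
--                 if user['total_tips'] < user_to_compare['total_tips']:
--                     position += 1
--     return convert_num_to_position(position)
--
-- def convert_num_to_position(number):
--     if number % 10 == 1:
--         return f'{number}st'
--     elif number % 10 == 2:
--         return f'{number}nd'
--     elif number % 10 == 3:
--         return f'{number}rd'
--     else:
--         return f'{number}th'
-- ===== SOURCE B (Python) =====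
-- def get_user_position(user_id, leaderboard):
--     tips = [u['total_tips'] for u in leaderboard]
--     counts = {}
--     for t in tips:
--         counts[t] = counts.get(t, 0) + 1
--     greater = {}
--     acc = 0
--     for t in sorted(counts, reverse=True):
--         greater[t] = acc
--         acc += counts[t]
--     position = 1
--     for u in leaderboard:
--         if u['id'] == user_id:
--             position += greater[u['total_tips']]
--     return convert_num_to_position(position)
--
-- def convert_num_to_position(number):
--     if number % 10 == 1:
--         return f'{number}st'
--     elif number % 10 == 2:
--         return f'{number}nd'
--     elif number % 10 == 3:
--         return f'{number}rd'
--     else: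
--         return f'{number}th'
-- ===== Notes on version B (the rewrite author's own statement) =====
-- stated objective: alternative
-- what changed: Replaces A's nested rescans (a full inner pass over the leaderboard for every matching user) with a counting dict sorted descending once, from which a strictly-greater-count table is built by one cumulative pass and each matching user is resolved by a single lookup.
-- outside the precondition, e.g. on get_user_position(1, [{'id': 2}]): A returns '1st', B raises KeyError
import Mathlib
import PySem

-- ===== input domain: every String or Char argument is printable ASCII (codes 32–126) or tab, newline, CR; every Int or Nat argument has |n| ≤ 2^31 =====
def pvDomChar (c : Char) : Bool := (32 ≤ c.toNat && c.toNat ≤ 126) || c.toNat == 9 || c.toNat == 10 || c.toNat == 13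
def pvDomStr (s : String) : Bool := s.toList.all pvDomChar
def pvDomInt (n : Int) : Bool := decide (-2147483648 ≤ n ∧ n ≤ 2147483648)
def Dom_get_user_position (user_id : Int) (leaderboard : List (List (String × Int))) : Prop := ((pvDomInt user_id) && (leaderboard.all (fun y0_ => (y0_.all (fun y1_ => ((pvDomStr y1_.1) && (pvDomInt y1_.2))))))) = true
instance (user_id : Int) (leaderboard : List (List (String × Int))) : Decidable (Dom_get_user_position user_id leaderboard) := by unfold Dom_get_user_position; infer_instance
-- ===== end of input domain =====

-- B replaces A's per-match inner rescans with one descending-sorted count table and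
-- a cumulative "strictly greater" lookup dict; equal return value on Pre_ (alternative, not claimed faster).


-- shared helper: Python `user[key]` where `user` is a dict given as an association list
-- (dict(pairs) keeps the last value for a repeated key; Pre_ guarantees the key is present,
-- so the default 0 is never returned under Pre_)
def dictGet (user : List (String × Int)) (key : String) : Int :=
  (PySem.Dict.ofList user).getD key 0

-- shared helper: port of convert_num_to_position (identical in A and in B, as in the sources)
def convert_num_to_position (number : Int) : String :=
  if PySem.Int.mod number 10 = 1 then String.ofList (PySem.Int.toChars number ++ ['s', 't'])
  else if PySem.Int.mod number 10 = 2 then String.ofList (PySem.Int.toChars number ++ ['n', 'd'])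
  else if PySem.Int.mod number 10 = 3 then String.ofList (PySem.Int.toChars number ++ ['r', 'd'])
  else String.ofList (PySem.Int.toChars number ++ ['t', 'h'])

-- ===== PORT A =====
def get_user_position (user_id : Int) (leaderboard : List (List (String × Int))) : String :=
  let position : Int :=
    leaderboard.foldl
      (fun pos user =>
        if dictGet user "id" = user_id then
          leaderboard.foldl
            (fun p user_to_compare =>
              if dictGet user "total_tips" < dictGet user_to_compare "total_tips" then p + 1 else p)
            pos
        else pos)
      1
  convert_num_to_position position

-- ===== PORT B =====
def get_user_position_alt (user_id : Int) (leaderboard : List (List (String × Int))) : String :=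
  let tips : List Int := leaderboard.map (fun u => dictGet u "total_tips")
  let counts : PySem.Dict Int Int :=
    tips.foldl (fun d t => d.insert t (d.getD t 0 + 1)) PySem.Dict.empty
  let greater : PySem.Dict Int Int × Int :=
    (PySem.List.sorted counts.keys (fun x => x) true).foldl
      (fun p t => (p.1.insert t p.2, p.2 + counts.getD t 0)) (PySem.Dict.empty, 0)
  let position : Int :=
    leaderboard.foldl
      (fun pos u =>
        if dictGet u "id" = user_id then pos + greater.1.getD (dictGet u "total_tips") 0 else pos)
      1
  convert_num_to_position position

-- ===== PRECONDITION & SPEC =====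
-- Pre_ excludes entries missing the 'id' or 'total_tips' key: A raises KeyError whenever some
-- 'id' is missing or a match exists, and B raises KeyError whenever 'total_tips' is missing;
-- the only A-returning inputs excluded are no-match leaderboards missing a 'total_tips' key.
def Pre_get_user_position (user_id : Int) (leaderboard : List (List (String × Int))) : Prop :=
  ∀ u ∈ leaderboard, (PySem.Dict.ofList u).contains "id" = true ∧ (PySem.Dict.ofList u).contains "total_tips" = true
instance (user_id : Int) (leaderboard : List (List (String × Int))) : Decidable (Pre_get_user_position user_id leaderboard) := by unfold Pre_get_user_position; infer_instance
def pvWitness_get_user_position : Int × (List (List (String × Int))) :=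
  (7, [[("id", 7), ("total_tips", 30)], [("id", 2), ("total_tips", 50)]])
def Spec_get_user_position (user_id : Int) (leaderboard : List (List (String × Int))) (out : String) : Prop := out = get_user_position_alt user_id leaderboard
instance (user_id : Int) (leaderboard : List (List (String × Int))) (out : String) : Decidable (Spec_get_user_position user_id leaderboard out) := by unfold Spec_get_user_position; infer_instance

-- ===== CLAIM (what is proved, stated in full; the proofs are below) =====
def Claim_equal_get_user_position : Prop := ∀ (user_id : Int) (leaderboard : List (List (String × Int))), Dom_get_user_position user_id leaderboard → Pre_get_user_position user_id leaderboard → Spec_get_user_position user_id leaderboard (get_user_position user_id leaderboard)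

-- ===== LEMMAS AND PROOFS =====

-- B's cumulative fold never disturbs a key absent from the remaining key list
theorem gfold_preserve (cnt : PySem.Dict Int Int) (ks : List Int) (g : PySem.Dict Int Int)
    (acc t : Int) (h : ∀ j ∈ ks, j ≠ t) :
    ((ks.foldl (fun p k => (p.1.insert k p.2, p.2 + cnt.getD k 0)) (g, acc)).1).getD t 0
      = g.getD t 0 := by
  induction ks generalizing g acc with
  | nil => rfl
  | cons k rest ih =>
      simp only [List.foldl_cons]
      rw [ih _ _ (fun j hj => h j (List.mem_cons_of_mem _ hj))]
      rw [PySem.Dict.getD_insert]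
      exact if_neg (fun e => h k List.mem_cons_self e.symm)

-- value of B's "greater" table at a key of a strictly-descending key list
theorem gfold_getD (cnt : PySem.Dict Int Int) (ks : List Int)
    (hpw : ks.Pairwise (fun a b => b < a)) (g : PySem.Dict Int Int) (acc t : Int)
    (ht : t ∈ ks) :
    ((ks.foldl (fun p k => (p.1.insert k p.2, p.2 + cnt.getD k 0)) (g, acc)).1).getD t 0
      = acc + ((ks.filter (fun k => t < k)).map (fun k => cnt.getD k 0)).sum := by
  induction ks generalizing g acc with
  | nil => cases ht
  | cons k rest ih =>
      have hk : ∀ j ∈ rest, j < k := fun j hj => List.rel_of_pairwise_cons hpw hj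
      simp only [List.foldl_cons]
      rcases List.mem_cons.1 ht with rfl | htr
      · have hrest : (rest.filter (fun j => t < j)) = [] := by
          apply List.filter_eq_nil_iff.2
          intro j hj
          simp only [decide_eq_true_eq]
          exact not_lt.2 (le_of_lt (hk j hj))
        rw [gfold_preserve _ _ _ _ _ (fun j hj => ne_of_lt (hk j hj))]
        rw [List.filter_cons_of_neg (by simp), hrest]
        simp [PySem.Dict.getD_insert_self]
      · have htk : t < k := hk t htr
        rw [ih hpw.of_cons _ _ htr]
        rw [List.filter_cons_of_pos (by simpa using htk)]
        simp only [List.map_cons, List.sum_cons]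
        ring

-- summing the multiplicities of the distinct values satisfying p counts the satisfying elements
theorem count_sum (tips ks : List Int) (hnd : ks.Nodup) (hmem : ∀ x, x ∈ ks ↔ x ∈ tips)
    (p : Int → Bool) :
    ((ks.filter p).map (fun k => tips.count k)).sum = tips.countP p := by
  have h1 : (ks.filter p).Nodup := hnd.filter _
  rw [← List.sum_toFinset _ h1]
  have h2 : (ks.filter p).toFinset = (tips.filter p).toFinset := by
    ext x
    simp [hmem x]
  rw [h2]
  have h3 : ∀ k ∈ (tips.filter p).toFinset, tips.count k = (tips.filter p).count k := by
    intro k hkf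
    have hpk : p k = true := (List.mem_filter.1 (List.mem_toFinset.1 hkf)).2
    simp [List.count_filter, hpk]
  rw [Finset.sum_congr rfl h3, List.sum_toFinset_count_eq_length, List.countP_eq_length_filter]

-- ===== VERDICT (by name: the statement is the Claim_ definition above) =====
theorem get_user_position_spec : Claim_equal_get_user_position := by
  intro user_id lb _ _
  unfold Spec_get_user_position get_user_position get_user_position_alt
  dsimp only
  apply congrArg
  -- names for B's intermediate structures
  set tips : List Int := lb.map (fun u => dictGet u "total_tips") with htips
  set cnt : PySem.Dict Int Int :=
    tips.foldl (fun d t => d.insert t (d.getD t 0 + 1)) PySem.Dict.empty with hcnt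
  have hcounter : cnt = PySem.Dict.counter tips := PySem.Dict.foldl_insert_getD_add_one_eq_counter tips
  set ks : List Int := PySem.List.sorted cnt.keys (fun x => x) true with hks
  have hkeys : cnt.keys = PySem.Set.ofList tips := by rw [hcounter]; exact PySem.Dict.keys_counter tips
  have hksnd : ks.Nodup := by
    rw [hks, hkeys]
    have := PySem.List.sorted_perm (PySem.Set.ofList tips) (fun x => x) true
    exact (List.Perm.nodup_iff this).mpr (PySem.Set.nodup_ofList tips)
  have hkspw : ks.Pairwise (fun a b => b < a) := by
    have hle : ks.Pairwise (fun a b => b ≤ a) := PySem.List.sorted_pairwise_rev cnt.keys (fun x => x)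
    have := hle.and hksnd
    exact this.imp (fun h => lt_of_le_of_ne h.1 (Ne.symm h.2))
  have hksmem : ∀ x, x ∈ ks ↔ x ∈ tips := by
    intro x
    rw [hks, PySem.List.mem_sorted, hkeys, PySem.Set.mem_ofList]
  apply PySem.List.foldl_congr_mem
  intro pos u hu
  by_cases hid : dictGet u "id" = user_id
  · rw [if_pos hid, if_pos hid]
    have httip : dictGet u "total_tips" ∈ tips := htips ▸ List.mem_map_of_mem hu
    rw [PySem.List.foldl_ite_add_one, gfold_getD cnt ks hkspw _ _ _ ((hksmem _).2 httip)]
    have hcntval : ∀ k, cnt.getD k 0 = (tips.count k : Int) := by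
      intro k; rw [hcounter]; exact PySem.Dict.getD_counter tips k
    have : ((ks.filter (fun k => dictGet u "total_tips" < k)).map (fun k => cnt.getD k 0)).sum
        = ((ks.filter (fun k => dictGet u "total_tips" < k)).map (fun k => (tips.count k : Int))).sum := by
      simp [hcntval]
    rw [this]
    have hcast : ((ks.filter (fun k => dictGet u "total_tips" < k)).map (fun k => (tips.count k : Int))).sum
        = (((ks.filter (fun k => dictGet u "total_tips" < k)).map (fun k => tips.count k)).sum : Int) := by
      rw [Nat.cast_list_sum, List.map_map]; rfl
    rw [hcast, count_sum tips ks hksnd hksmem]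
    have hcp : tips.countP (fun k => dictGet u "total_tips" < k)
        = lb.countP (fun utc => decide (dictGet u "total_tips" < dictGet utc "total_tips")) := by
      rw [htips, List.countP_map]; rfl
    rw [hcp]
    ring
  · rw [if_neg hid, if_neg hid]
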